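-- pv_equiv track=rewrite | github.com/michaeldhood/chatrxiv | src/divergence/topic_modeling.py | _extract_segments
-- ===== SOURCE A (Python) =====
-- from typing import List, Dict, Any, Optional, Tuple
--
-- def _extract_segments(topics: List[int]) -> List[Dict[str, Any]]:
--     """
--     Group contiguous messages with same topic into segments.
--
--     Parameters
--     ----------
--     topics : List[int]
--         Topic ID per message
--
--     Returns
--     -------
--     list[dict]
--         List of segment dictionaries
--     """
--     if not topics:
--         return []
--
--     segments = []
--     current_segment = {
--         'topic_id': topics[0],
--         'start_idx': 0,
--         'end_idx': 0,
--     }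
--
--     for i in range(1, len(topics)):
--         if topics[i] == current_segment['topic_id']:
--             # Extend current segment
--             current_segment['end_idx'] = i
--         else:
--             # Close current segment and start new one
--             segments.append(current_segment)
--             current_segment = {
--                 'topic_id': topics[i],
--                 'start_idx': i,
--                 'end_idx': i,
--             }
--
--     # Don't forget the last segment
--     segments.append(current_segment)
--
--     return segments
-- ===== SOURCE B (Python) =====
-- def _extract_segments(topics):
--     if not topics:
--         return []
--     n = len(topics)
--     # phase 1: boundary table of change-point indices
--     breaks = [0]
--     for i in range(1, n):
--         if topics[i] != topics[i - 1]:
--             breaks.append(i)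
--     breaks.append(n)
--     # phase 2: one segment per consecutive pair of boundaries
--     return [
--         {'topic_id': topics[start], 'start_idx': start, 'end_idx': nxt - 1}
--         for start, nxt in zip(breaks, breaks[1:])
--     ]
-- ===== Notes on version B (the rewrite author's own statement) =====
-- stated objective: alternative
-- what changed: Replaces the single scan that mutates a current_segment dict with two separate phases: one pass building a boundary table of change-point indices, then a pair-loop over consecutive boundaries emitting the segments.
import Mathlib
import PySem

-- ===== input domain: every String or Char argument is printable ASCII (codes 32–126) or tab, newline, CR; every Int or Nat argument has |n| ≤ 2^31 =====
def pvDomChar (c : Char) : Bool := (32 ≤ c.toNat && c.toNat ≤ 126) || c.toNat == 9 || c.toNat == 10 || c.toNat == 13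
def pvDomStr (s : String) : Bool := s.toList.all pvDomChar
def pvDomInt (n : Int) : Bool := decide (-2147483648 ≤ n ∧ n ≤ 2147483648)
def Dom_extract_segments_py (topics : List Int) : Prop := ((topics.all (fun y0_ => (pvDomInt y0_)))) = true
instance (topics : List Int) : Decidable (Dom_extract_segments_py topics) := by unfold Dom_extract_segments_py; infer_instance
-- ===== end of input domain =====

-- B replaces A's single scan that mutates a current_segment dict by two phases: a boundary table of change-point indices, then a pair-loop over consecutive boundaries (alternative decomposition, same cost).

-- ===== PORT A =====
-- loop body of A: extend the current segment (overwrite 'end_idx') or flush it and start a new one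
def pvStepA (topics : List Int) (st : List (List (String × Int)) × PySem.Dict String Int) (i : Int) :
    List (List (String × Int)) × PySem.Dict String Int :=
  if PySem.List.pyGetD topics i 0 == st.2.getD "topic_id" 0 then
    (st.1, st.2.insert "end_idx" i)
  else
    (st.1 ++ [st.2.items],
     PySem.Dict.ofList [("topic_id", PySem.List.pyGetD topics i 0), ("start_idx", i), ("end_idx", i)])

def extract_segments_py (topics : List Int) : List (List (String × Int)) :=
  if topics = [] then []
  else
    -- topics[0] and topics[i] for i in range(1, len) are in range, so pyGetD is exact
    let res := (PySem.List.pyRange 1 (PySem.List.len topics) 1).foldl (pvStepA topics)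
      ([], PySem.Dict.ofList [("topic_id", PySem.List.pyGetD topics 0 0), ("start_idx", 0), ("end_idx", 0)])
    res.1 ++ [res.2.items]

-- ===== PORT B =====
-- phase-1 loop body: record i when topics[i] != topics[i-1] (both indices in range, pyGetD exact)
def pvStepB (topics : List Int) (acc : List Int) (i : Int) : List Int :=
  if PySem.List.pyGetD topics i 0 != PySem.List.pyGetD topics (i - 1) 0 then acc ++ [i] else acc

-- phase-2 comprehension body: one segment dict per boundary pair (start, nxt)
def pvMkSeg (topics : List Int) (p : Int × Int) : List (String × Int) :=
  [("topic_id", PySem.List.pyGetD topics p.1 0), ("start_idx", p.1), ("end_idx", p.2 - 1)]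

def extract_segments_py_alt (topics : List Int) : List (List (String × Int)) :=
  if topics = [] then []
  else
    let breaks := ((PySem.List.pyRange 1 (PySem.List.len topics) 1).foldl (pvStepB topics) [0])
                  ++ [PySem.List.len topics]
    (breaks.zip (PySem.List.slice breaks (some 1) none)).map (pvMkSeg topics)

-- ===== PRECONDITION & SPEC =====
def Spec_extract_segments_py (topics : List Int) (out : List (List (String × Int))) : Prop := out = extract_segments_py_alt topics
instance (topics : List Int) (out : List (List (String × Int))) : Decidable (Spec_extract_segments_py topics out) := by unfold Spec_extract_segments_py; infer_instance

-- ===== CLAIM (what is proved, stated in full; the proofs are below) =====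
def Claim_equal_extract_segments_py : Prop := ∀ (topics : List Int), Dom_extract_segments_py topics → Spec_extract_segments_py topics (extract_segments_py topics)

-- ===== LEMMAS AND PROOFS =====

-- reference decomposition: runs of equal topics as (topic, start, end) index triples
def segsRef (t s e : Int) : List Int → List (Int × Int × Int)
  | [] => [(t, s, e)]
  | x :: xs => if x = t then segsRef t s (e + 1) xs else (t, s, e) :: segsRef x (e + 1) (e + 1) xs

def pvToDict (p : Int × Int × Int) : List (String × Int) :=
  [("topic_id", p.1), ("start_idx", p.2.1), ("end_idx", p.2.2)]

lemma pyGetD_app (pre : List Int) (x : Int) (rest : List Int) :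
    PySem.List.pyGetD (pre ++ x :: rest) (pre.length : Int) 0 = x := by
  rw [PySem.List.pyGetD_natCast]; simp [List.getD_eq_getElem?_getD]

lemma items3 (t s e : Int) :
    (PySem.Dict.ofList [("topic_id", t), ("start_idx", s), ("end_idx", e)]).items
    = [("topic_id", t), ("start_idx", s), ("end_idx", e)] := rfl

lemma insert3 (t s e i : Int) :
    (PySem.Dict.ofList [("topic_id", t), ("start_idx", s), ("end_idx", e)]).insert "end_idx" i
    = PySem.Dict.ofList [("topic_id", t), ("start_idx", s), ("end_idx", i)] := rfl

lemma A_loop : ∀ (rest pre : List Int) (segs : List (List (String × Int))) (t s : Int),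
    pre ≠ [] →
    (let r := (PySem.List.pyRange (pre.length : Int) (PySem.List.len (pre ++ rest)) 1).foldl
        (pvStepA (pre ++ rest))
        (segs, PySem.Dict.ofList [("topic_id", t), ("start_idx", s), ("end_idx", (pre.length : Int) - 1)])
     r.1 ++ [r.2.items])
    = segs ++ (segsRef t s ((pre.length : Int) - 1) rest).map pvToDict := by
  intro rest
  induction rest with
  | nil =>
    intro pre segs t s hpre
    rw [PySem.List.pyRange_one_eq_nil (by simp)]
    simp [segsRef, pvToDict, items3]
  | cons x rest' ih =>
    intro pre segs t s hpre
    have hlt : (pre.length : Int) < PySem.List.len (pre ++ x :: rest') := by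
      simp only [PySem.List.len_eq, List.length_append, List.length_cons]; push_cast; omega
    rw [PySem.List.pyRange_one_cons hlt]
    simp only [List.foldl_cons]
    have hstep : pvStepA (pre ++ x :: rest')
        (segs, PySem.Dict.ofList [("topic_id", t), ("start_idx", s), ("end_idx", (pre.length : Int) - 1)])
        ((pre.length : Int)) =
        if x = t then
          (segs, PySem.Dict.ofList [("topic_id", t), ("start_idx", s), ("end_idx", (pre.length : Int))])
        else
          (segs ++ [pvToDict (t, s, (pre.length : Int) - 1)],
           PySem.Dict.ofList [("topic_id", x), ("start_idx", (pre.length : Int)), ("end_idx", (pre.length : Int))]) := by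
      show (if (PySem.List.pyGetD (pre ++ x :: rest') (pre.length : Int) 0 == t) then _ else _) = _
      rw [pyGetD_app]
      by_cases h : x = t <;> simp [h, pvToDict, insert3, items3]
    rw [hstep]
    by_cases h : x = t
    · rw [if_pos h]
      have := ih (pre ++ [x]) segs t s (by simp)
      simp only [List.append_assoc, List.cons_append, List.nil_append, List.length_append,
        List.length_cons, List.length_nil] at this ⊢
      have hc : ((pre.length + 1 : Nat) : Int) - 1 = (pre.length : Int) := by push_cast; omega
      rw [hc] at this
      have hr : ((pre.length : Int) + 1) = ((pre.length + 1 : Nat) : Int) := by push_cast; ring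
      rw [hr]
      rw [this]
      simp [segsRef, h]
    · rw [if_neg h]
      have := ih (pre ++ [x]) (segs ++ [pvToDict (t, s, (pre.length : Int) - 1)]) x (pre.length : Int) (by simp)
      simp only [List.append_assoc, List.cons_append, List.nil_append, List.length_append,
        List.length_cons, List.length_nil] at this ⊢
      have hc : ((pre.length + 1 : Nat) : Int) - 1 = (pre.length : Int) := by push_cast; omega
      rw [hc] at this
      have hr : ((pre.length : Int) + 1) = ((pre.length + 1 : Nat) : Int) := by push_cast; ring
      rw [hr, this]
      simp [segsRef, h, pvToDict]

lemma segsRef_head (t s e : Int) (rest : List Int) :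
    ∃ t' e' tl, segsRef t s e rest = (t', s, e') :: tl := by
  induction rest generalizing e with
  | nil => exact ⟨t, e, [], rfl⟩
  | cons x xs ih =>
    by_cases h : x = t
    · simpa [segsRef, h] using ih (e + 1)
    · exact ⟨t, e, segsRef x (e + 1) (e + 1) xs, by simp [segsRef, h]⟩

lemma B_breaks : ∀ (rest q : List Int) (v s : Int) (acc : List Int),
    (PySem.List.pyRange ((q.length : Int) + 1) (PySem.List.len ((q ++ [v]) ++ rest)) 1).foldl
        (pvStepB ((q ++ [v]) ++ rest)) acc
    = acc ++ ((segsRef v s ((q.length : Int)) rest).map (fun p => p.2.1)).tail := by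
  intro rest
  induction rest with
  | nil =>
    intro q v s acc
    rw [PySem.List.pyRange_one_eq_nil (by simp)]
    simp [segsRef]
  | cons x rest' ih =>
    intro q v s acc
    have hlt : (q.length : Int) + 1 < PySem.List.len ((q ++ [v]) ++ x :: rest') := by
      simp only [PySem.List.len_eq, List.length_append, List.length_cons]; push_cast; omega
    rw [PySem.List.pyRange_one_cons hlt]
    simp only [List.foldl_cons]
    have hx : PySem.List.pyGetD ((q ++ [v]) ++ x :: rest') ((q.length : Int) + 1) 0 = x := by
      have := pyGetD_app (q ++ [v]) x rest'
      simpa using this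
    have hv : PySem.List.pyGetD ((q ++ [v]) ++ x :: rest') ((q.length : Int) + 1 - 1) 0 = v := by
      have := pyGetD_app q v ([] ++ x :: rest')
      simp only [List.append_assoc, List.cons_append, List.nil_append] at this ⊢
      have he : (q.length : Int) + 1 - 1 = (q.length : Int) := by omega
      rw [he]; exact this
    have hstep : pvStepB ((q ++ [v]) ++ x :: rest') acc ((q.length : Int) + 1)
        = if x = v then acc else acc ++ [(q.length : Int) + 1] := by
      unfold pvStepB
      rw [hx, hv]
      by_cases h : x = v <;> simp [h]
    rw [hstep]
    by_cases h : x = v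
    · rw [if_pos h]; subst h
      have := ih (q ++ [x]) x s acc
      simp only [List.append_assoc, List.cons_append, List.nil_append, List.length_append,
        List.length_cons, List.length_nil] at this ⊢
      push_cast at this
      simpa [segsRef] using this
    · rw [if_neg h]
      have := ih (q ++ [v]) x ((q.length : Int) + 1) (acc ++ [(q.length : Int) + 1])
      simp only [List.append_assoc, List.cons_append, List.nil_append, List.length_append,
        List.length_cons, List.length_nil] at this ⊢
      push_cast at this
      rw [this]
      obtain ⟨t', e', tl, hS⟩ := segsRef_head x ((q.length : Int) + 1) ((q.length : Int) + 1) rest'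
      simp [segsRef, h, hS]

lemma B_pairs : ∀ (rest q : List Int) (v s : Int),
    PySem.List.pyGetD ((q ++ [v]) ++ rest) s 0 = v →
    (let L := s :: ((segsRef v s ((q.length : Int)) rest).map (fun p => p.2.1)).tail
                ++ [PySem.List.len ((q ++ [v]) ++ rest)]
     (L.zip L.tail).map (pvMkSeg ((q ++ [v]) ++ rest)))
    = (segsRef v s ((q.length : Int)) rest).map pvToDict := by
  intro rest
  induction rest with
  | nil =>
    intro q v s h
    simp only [List.append_nil] at h ⊢
    simp [segsRef, pvMkSeg, pvToDict, h]
  | cons x rest' ih =>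
    intro q v s h
    simp only [List.append_assoc, List.cons_append, List.nil_append] at h ⊢
    by_cases hxv : x = v
    · subst hxv
      have hIH := ih (q ++ [x]) x s (by
        simp only [List.append_assoc, List.cons_append, List.nil_append]
        exact h)
      simp only [List.append_assoc, List.cons_append, List.nil_append, List.length_append,
        List.length_cons, List.length_nil] at hIH
      push_cast at hIH
      simpa [segsRef] using hIH
    · have hx : PySem.List.pyGetD (q ++ v :: x :: rest') ((q.length : Int) + 1) 0 = x := by
        have := pyGetD_app (q ++ [v]) x rest'
        simpa using this
      have hIH := ih (q ++ [v]) x ((q.length : Int) + 1) (by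
        simp only [List.append_assoc, List.cons_append, List.nil_append]
        exact hx)
      simp only [List.append_assoc, List.cons_append, List.nil_append, List.length_append,
        List.length_cons, List.length_nil] at hIH
      push_cast at hIH
      obtain ⟨t', e', tl, hS⟩ := segsRef_head x ((q.length : Int) + 1) ((q.length : Int) + 1) rest'
      rw [hS] at hIH
      have hun : segsRef v s ((q.length : Int)) (x :: rest')
          = (v, s, (q.length : Int)) :: segsRef x ((q.length : Int) + 1) ((q.length : Int) + 1) rest' := by
        simp [segsRef, hxv]
      rw [hun, hS]
      simp only [List.map_cons, List.tail_cons, List.cons_append, List.zip_cons_cons,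
        List.map_cons] at hIH ⊢
      rw [hIH]
      simp [pvMkSeg, pvToDict, h]

lemma pv_main : ∀ (topics : List Int), extract_segments_py topics = extract_segments_py_alt topics := by
  intro topics
  match topics with
  | [] => rfl
  | t0 :: rest =>
    unfold extract_segments_py extract_segments_py_alt
    rw [if_neg (by simp), if_neg (by simp)]
    have hA := A_loop rest [t0] [] t0 0 (by simp)
    simp only [List.cons_append, List.nil_append, List.length_cons, List.length_nil] at hA
    push_cast at hA
    have h0 : PySem.List.pyGetD (t0 :: rest) (0 : Int) 0 = t0 := by
      simp [PySem.List.pyGetD_zero_cons]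
    have hB := B_breaks rest [] t0 0 [0]
    simp only [List.cons_append, List.nil_append, List.length_nil] at hB
    push_cast at hB
    have hP := B_pairs rest [] t0 0 (by simp [PySem.List.pyGetD_zero_cons])
    simp only [List.cons_append, List.nil_append, List.length_nil] at hP
    push_cast at hP
    simp only [h0]
    rw [hA, hB, PySem.List.slice_from_one]
    simp only [List.cons_append, List.tail_cons] at hP ⊢
    exact hP.symm

-- ===== VERDICT (by name: the statement is the Claim_ definition above) =====
theorem extract_segments_py_spec : Claim_equal_extract_segments_py := by
  intro topics _
  exact pv_main topics
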